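-- pv_equiv track=rewrite | github.com/alice203/deep-learning-challenge | final.py | dictionary_tokens_encode
-- ===== SOURCE A (Python) =====
-- def dictionary_tokens_encode(tokenized_seq_list):
--     dic = {}
--     counter = 0
--     for tokenlist in tokenized_seq_list:
--         for token in tokenlist:
--             if token in dic:
--                 continue
--             else:
--                 dic[token] = counter
--                 counter +=1
--     return dic
-- ===== SOURCE B (Python) =====
-- def dictionary_tokens_encode(tokenized_seq_list):
--     # Rank-by-first-occurrence: a reverse sweep over the flattened stream records
--     # each token's first position (earlier occurrences overwrite later ones, no
--     # membership test); sorting the tokens by that position and enumerating the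
--     # result assigns the incremental indices.
--     flat = [token for seq in tokenized_seq_list for token in seq]
--     first = {}
--     for pos, tok in reversed(list(enumerate(flat))):
--         first[tok] = pos
--     order = sorted(first, key=first.get)
--     return {tok: rank for rank, tok in enumerate(order)}
-- ===== Notes on version B (the rewrite author's own statement) =====
-- stated objective: alternative
-- what changed: Replaces A's forward streaming loop (membership test on a dict plus a manual counter) by a sort-based ranking: a reverse sweep records each token's first-occurrence position by plain overwrite, then the tokens are sorted by that position and enumerated to get their indices; correct because first-occurrence positions are distinct and sorting by them reproduces first-appearance order.
import Mathlib
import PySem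

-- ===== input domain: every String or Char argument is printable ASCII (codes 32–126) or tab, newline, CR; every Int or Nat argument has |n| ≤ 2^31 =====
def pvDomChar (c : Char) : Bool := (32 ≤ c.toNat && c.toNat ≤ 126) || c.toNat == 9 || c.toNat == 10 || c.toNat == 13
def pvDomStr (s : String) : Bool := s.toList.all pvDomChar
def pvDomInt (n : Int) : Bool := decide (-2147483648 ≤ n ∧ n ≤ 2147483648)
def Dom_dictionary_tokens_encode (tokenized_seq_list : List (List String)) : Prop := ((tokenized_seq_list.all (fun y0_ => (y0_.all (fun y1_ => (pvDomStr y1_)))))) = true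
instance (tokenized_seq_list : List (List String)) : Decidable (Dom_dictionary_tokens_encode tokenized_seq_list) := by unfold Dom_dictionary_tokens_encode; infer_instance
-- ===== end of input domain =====

-- B replaces A's forward streaming loop (membership dict + manual counter) by a sort-based
-- ranking: a reverse sweep records first-occurrence positions by overwrite, the tokens are
-- sorted by that position and enumerated (alternative algorithm; same return values).

-- ===== PORT A =====
-- literal port of A: nested for-loops over a dict and a counter
def dictionary_tokens_encode (tokenized_seq_list : List (List String)) : List (String × Int) :=
  (tokenized_seq_list.foldl
    (fun (st : PySem.Dict String Int × Int) tokenlist =>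
      tokenlist.foldl
        (fun st token =>
          if st.1.contains token then st
          else (st.1.insert token st.2, st.2 + 1)) st)
    (PySem.Dict.empty, 0)).1.items

-- ===== PORT B =====
-- literal port of Source B: reverse sweep filling first[tok] = pos, sorted(first, key=first.get),
-- then the enumerate-based comprehension.  first.get t is never None here (every key of
-- 'first' was inserted with a position), so '.getD 0' is exact.
def dictionary_tokens_encode_alt (tokenized_seq_list : List (List String)) : List (String × Int) :=
  let flat := tokenized_seq_list.flatten
  let first := (PySem.List.enumerate flat 0).reverse.foldl
      (fun (d : PySem.Dict String Int) p => d.insert p.2 p.1) PySem.Dict.empty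
  let order := PySem.List.sorted first.keys (fun t => first.getD t 0)
  (PySem.List.enumerate order 0).map (fun p => (p.2, p.1))

-- ===== PRECONDITION & SPEC =====
def Spec_dictionary_tokens_encode (tokenized_seq_list : List (List String)) (out : List (String × Int)) : Prop := out = dictionary_tokens_encode_alt tokenized_seq_list
instance (tokenized_seq_list : List (List String)) (out : List (String × Int)) : Decidable (Spec_dictionary_tokens_encode tokenized_seq_list out) := by unfold Spec_dictionary_tokens_encode; infer_instance

-- ===== CLAIM (what is proved, stated in full; the proofs are below) =====
def Claim_equal_dictionary_tokens_encode : Prop := ∀ (tokenized_seq_list : List (List String)), Dom_dictionary_tokens_encode tokenized_seq_list → Spec_dictionary_tokens_encode tokenized_seq_list (dictionary_tokens_encode tokenized_seq_list)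

-- ===== LEMMAS AND PROOFS =====

-- the canonical A-state after having seen the distinct tokens ks (first-appearance order)
def pvStateOf (ks : List String) : PySem.Dict String Int × Int :=
  (PySem.Dict.mk ((PySem.List.enumerate ks 0).map (fun p => (p.2, p.1))), (ks.length : Int))

theorem pvEnumerate_append (ks : List String) (x : String) (s : Int) :
    PySem.List.enumerate (ks ++ [x]) s
      = PySem.List.enumerate ks s ++ [(s + ks.length, x)] := by
  induction ks generalizing s with
  | nil => simp [PySem.List.enumerate_cons, PySem.List.enumerate_nil]
  | cons y ys ih =>
      simp [PySem.List.enumerate_cons, ih]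
      ring_nf

theorem pvAny_enumerate (ks : List String) (x : String) (s : Int) :
    ((PySem.List.enumerate ks s).any (fun p => p.2 == x)) = ks.contains x := by
  induction ks generalizing s with
  | nil => rfl
  | cons y ys ih =>
      simp only [PySem.List.enumerate_cons, List.any_cons, ih, List.contains_cons]
      rw [Bool.eq_iff_iff]
      simp
      tauto

theorem pvContains_stateOf (ks : List String) (x : String) :
    (pvStateOf ks).1.contains x = ks.contains x := by
  rw [← pvAny_enumerate ks x 0]
  simp [pvStateOf, PySem.Dict.contains, List.any_map, Function.comp_def]

theorem pvStep_stateOf (ks : List String) (x : String) :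
    (if (pvStateOf ks).1.contains x then pvStateOf ks
     else ((pvStateOf ks).1.insert x (pvStateOf ks).2, (pvStateOf ks).2 + 1))
      = pvStateOf (PySem.Set.add ks x) := by
  rw [pvContains_stateOf]
  by_cases h : x ∈ ks
  · simp [PySem.Set.add, h]
  · have hb : ks.contains x = false := by simpa using h
    have hc : (pvStateOf ks).1.contains x = false := by
      rw [pvContains_stateOf]; exact hb
    simp only [hb, Bool.false_eq_true, if_false, PySem.Set.add, PySem.Dict.insert, hc]
    have hs : PySem.Set.contains ks x = false := hb
    simp only [hs, Bool.false_eq_true, if_false]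
    simp [pvStateOf, pvEnumerate_append]

theorem pvInner_fold (xs ks : List String) :
    xs.foldl
      (fun st token =>
        if (st : PySem.Dict String Int × Int).1.contains token then st
        else (st.1.insert token st.2, st.2 + 1)) (pvStateOf ks)
      = pvStateOf (xs.foldl PySem.Set.add ks) := by
  induction xs generalizing ks with
  | nil => rfl
  | cons x xs ih =>
      simp only [List.foldl_cons]
      rw [pvStep_stateOf, ih]

theorem pvOuter_fold (l : List (List String)) (ks : List String) :
    l.foldl
      (fun (st : PySem.Dict String Int × Int) tokenlist =>
        tokenlist.foldl
          (fun st token =>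
            if st.1.contains token then st
            else (st.1.insert token st.2, st.2 + 1)) st) (pvStateOf ks)
      = pvStateOf (l.flatten.foldl PySem.Set.add ks) := by
  induction l generalizing ks with
  | nil => rfl
  | cons xs l ih =>
      simp only [List.foldl_cons, List.flatten_cons, List.foldl_append]
      rw [pvInner_fold, ih]

-- first-occurrence positions strictly increase along set(xs)'s first-appearance order
theorem pvPairwise_index (xs : List String) :
    (PySem.Set.ofList xs).Pairwise
      (fun a b => (PySem.List.index? xs a).getD 0 < (PySem.List.index? xs b).getD 0) := by
  induction xs using List.reverseRecOn with
  | nil => simp [PySem.Set.ofList_nil]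
  | append_singleton ys x ih =>
      rw [PySem.Set.ofList_append_singleton]
      by_cases h : x ∈ PySem.Set.ofList ys
      · have : PySem.Set.add (PySem.Set.ofList ys) x = PySem.Set.ofList ys := by
          simp [PySem.Set.add, PySem.Set.contains, h]
        rw [this]
        refine ih.imp_of_mem ?_
        intro a b ha hb hlt
        have ha' : a ∈ ys := (PySem.Set.mem_ofList ys a).1 ha
        have hb' : b ∈ ys := (PySem.Set.mem_ofList ys b).1 hb
        rwa [PySem.List.index?_append_of_mem [x] ha',
             PySem.List.index?_append_of_mem [x] hb']
      · have hx : x ∉ ys := fun hm => h ((PySem.Set.mem_ofList ys x).2 hm)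
        have : PySem.Set.add (PySem.Set.ofList ys) x = PySem.Set.ofList ys ++ [x] := by
          simp [PySem.Set.add, PySem.Set.contains, h]
        rw [this, List.pairwise_append]
        refine ⟨?_, by simp, ?_⟩
        · refine ih.imp_of_mem ?_
          intro a b ha hb hlt
          have ha' : a ∈ ys := (PySem.Set.mem_ofList ys a).1 ha
          have hb' : b ∈ ys := (PySem.Set.mem_ofList ys b).1 hb
          rwa [PySem.List.index?_append_of_mem [x] ha',
               PySem.List.index?_append_of_mem [x] hb']
        · intro a ha b hb
          have ha' : a ∈ ys := (PySem.Set.mem_ofList ys a).1 ha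
          have hb' : b = x := by simpa using hb
          subst hb'
          rw [PySem.List.index?_append_of_mem [b] ha',
              PySem.List.index?_append_singleton_self ys b hx]
          have := (PySem.List.index?_isSome_iff ys a).2 ha'
          rcases ho : PySem.List.index? ys a with _ | k
          · rw [ho] at this; simp at this
          · have hk := PySem.List.getElem_of_index?_eq_some ho
            rcases hk with ⟨hkl, _, _⟩
            simpa using hkl

-- the fold of B: get? k is the FIRST pair of ps.reverse with second component k
theorem pvGet_fold (ps : List (Int × String)) (d : PySem.Dict String Int) (k : String) :
    ((ps.foldl (fun d p => d.insert p.2 p.1) d).get? k)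
      = (match ps.reverse.find? (fun p => p.2 == k) with
         | some p => some p.1
         | none => d.get? k) := by
  induction ps using List.reverseRecOn generalizing d with
  | nil => simp
  | append_singleton qs q ih =>
      rw [List.foldl_append, List.foldl_cons, List.foldl_nil, List.reverse_append]
      simp only [List.reverse_cons, List.reverse_nil, List.nil_append, List.singleton_append,
        List.find?_cons]
      by_cases h : q.2 = k
      · subst h
        simp [PySem.Dict.get?_insert_self]
      · rw [PySem.Dict.get?_insert_of_ne _ _ (fun hk => h hk.symm), ih]
        have hq : (q.2 == k) = false := by simp [h]
        simp only [hq]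

-- find? over enumerate locates the first occurrence
theorem pvFind_enumerate (xs : List String) (k : String) (s : Int) (h : k ∈ xs) :
    (PySem.List.enumerate xs s).find? (fun p => p.2 == k)
      = some (s + ((PySem.List.index? xs k).getD 0 : Nat), k) := by
  induction xs generalizing s with
  | nil => cases h
  | cons y ys ih =>
      rw [PySem.List.enumerate_cons, List.find?_cons]
      by_cases hy : y = k
      · subst hy
        rw [PySem.List.index?_cons_self]
        simp
      · have hk : k ∈ ys := by
          rcases List.mem_cons.1 h with h1 | h1
          · exact absurd h1.symm hy
          · exact h1
        have hsome := (PySem.List.index?_isSome_iff ys k).2 hk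
        rcases ho : PySem.List.index? ys k with _ | j
        · rw [ho] at hsome; simp at hsome
        · rw [PySem.List.index?_cons_of_ne _ hy, ho]
          have hby : ((s, y).2 == k) = false := by simp [hy]
          simp only [hby, ih _ hk, ho]
          simp
          omega

-- getD of B's 'first' dict = first-occurrence position in flat
theorem pvGetD_first (flat : List String) (k : String) (h : k ∈ flat) :
    (((PySem.List.enumerate flat 0).reverse.foldl
        (fun (d : PySem.Dict String Int) p => d.insert p.2 p.1) PySem.Dict.empty).getD k 0)
      = ((PySem.List.index? flat k).getD 0 : Nat) := by
  rw [PySem.Dict.getD_eq_get?_getD, pvGet_fold, List.reverse_reverse, pvFind_enumerate flat k 0 h]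
  simp

-- the keys of B's 'first' dict are set(reversed(flat))
theorem pvKeys_first (flat : List String) :
    ((PySem.List.enumerate flat 0).reverse.foldl
        (fun (d : PySem.Dict String Int) p => d.insert p.2 p.1) PySem.Dict.empty).keys
      = PySem.Set.ofList flat.reverse := by
  have h := PySem.Dict.keys_foldl_insert_key ((PySem.List.enumerate flat 0).reverse)
    (Prod.snd) (fun _ p => p.1) (PySem.Dict.empty (κ := String) (ν := Int))
  rw [h]
  have : (PySem.List.enumerate flat 0).reverse.map Prod.snd = flat.reverse := by
    rw [List.map_reverse, PySem.List.map_snd_enumerate]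
  rw [this]
  rfl

-- sorting the keys by first-occurrence position restores first-appearance order
theorem pvSorted_keys (flat : List String) :
    PySem.List.sorted
      ((PySem.List.enumerate flat 0).reverse.foldl
          (fun (d : PySem.Dict String Int) p => d.insert p.2 p.1) PySem.Dict.empty).keys
      (fun t => ((PySem.List.enumerate flat 0).reverse.foldl
          (fun (d : PySem.Dict String Int) p => d.insert p.2 p.1) PySem.Dict.empty).getD t 0)
      = PySem.Set.ofList flat := by
  apply PySem.List.sorted_eq_of_perm_of_pairwise_lt
  · rw [pvKeys_first]
    refine (List.perm_ext_iff_of_nodup (PySem.Set.nodup_ofList _) (PySem.Set.nodup_ofList _)).2 ?_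
    intro a
    rw [PySem.Set.mem_ofList, PySem.Set.mem_ofList, List.mem_reverse]
  · refine (pvPairwise_index flat).imp_of_mem ?_
    intro a b ha hb hlt
    have ha' : a ∈ flat := (PySem.Set.mem_ofList flat a).1 ha
    have hb' : b ∈ flat := (PySem.Set.mem_ofList flat b).1 hb
    rw [pvGetD_first flat a ha', pvGetD_first flat b hb']
    exact_mod_cast hlt

-- ===== VERDICT (by name: the statement is the Claim_ definition above) =====
theorem dictionary_tokens_encode_spec : Claim_equal_dictionary_tokens_encode := by
  intro l _
  show dictionary_tokens_encode l = dictionary_tokens_encode_alt l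
  unfold dictionary_tokens_encode dictionary_tokens_encode_alt
  have h0 : (PySem.Dict.empty, (0 : Int)) = pvStateOf [] := rfl
  rw [h0, pvOuter_fold, ← PySem.Set.ofList_eq_foldl]
  simp only [pvSorted_keys]
  rfl
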